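-- pv_equiv track=rewrite | github.com/PedroRosalba/codigos-faculdade | lista6.py | contains_lake
-- ===== SOURCE A (Python) =====
-- def contains_lake(matrix):
--     rows = len(matrix)
--     cols = len(matrix[0])
--     visited = [[False for _ in range(cols)] for _ in range(rows)]
--
--     directions = [(-1, 0), (1, 0), (0, -1), (0, 1)]
--
--     def is_boundary(x, y):
--         return x == 0 or y == 0 or x == rows - 1 or y == cols - 1
--
--     def dfs(x, y):
--         stack = [(x, y)]
--         is_lake = True
--         visited[x][y] = True
--         while stack:
--             cx, cy = stack.pop()
--             if is_boundary(cx, cy):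
--                 is_lake = False
--             for dx, dy in directions:
--                 nx, ny = cx + dx, cy + dy
--                 if 0 <= nx < rows and 0 <= ny < cols and not visited[nx][ny] and matrix[nx][ny] == '0':
--                     visited[nx][ny] = True
--                     stack.append((nx, ny))
--         return is_lake
--
--     for i in range(1, rows - 1):
--         for j in range(1, cols - 1):
--             if matrix[i][j] == '0' and not visited[i][j]:
--                 if dfs(i, j):
--                     return True
--     return False
-- ===== SOURCE B (Python) =====
-- def contains_lake(matrix):
--     rows = len(matrix)
--     cols = len(matrix[0])
--     visited = [[False] * cols for _ in range(rows)]
--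
--     # Flood-fill once from every boundary '0' cell, marking all edge-reachable zeros.
--     stack = []
--     for i in range(rows):
--         for j in range(cols):
--             if (i == 0 or j == 0 or i == rows - 1 or j == cols - 1) \
--                     and matrix[i][j] == '0' and not visited[i][j]:
--                 visited[i][j] = True
--                 stack.append((i, j))
--     while stack:
--         x, y = stack.pop()
--         for dx, dy in ((-1, 0), (1, 0), (0, -1), (0, 1)):
--             nx, ny = x + dx, y + dy
--             if 0 <= nx < rows and 0 <= ny < cols and not visited[nx][ny] and matrix[nx][ny] == '0':
--                 visited[nx][ny] = True
--                 stack.append((nx, ny))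
--
--     # Any interior '0' the boundary flood never reached lies in an enclosed lake.
--     for i in range(1, rows - 1):
--         for j in range(1, cols - 1):
--             if matrix[i][j] == '0' and not visited[i][j]:
--                 return True
--     return False
-- ===== Notes on version B (the rewrite author's own statement) =====
-- stated objective: simpler
-- what changed: Instead of running a per-component DFS with an is_lake flag from every unvisited interior zero, B flood-fills once from all boundary '0' cells and then merely scans the interior for a '0' the flood never reached.
-- outside the precondition, e.g. on contains_lake([['1', '1'], ['1']]): A returns False, B raises IndexError
import Mathlib
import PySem

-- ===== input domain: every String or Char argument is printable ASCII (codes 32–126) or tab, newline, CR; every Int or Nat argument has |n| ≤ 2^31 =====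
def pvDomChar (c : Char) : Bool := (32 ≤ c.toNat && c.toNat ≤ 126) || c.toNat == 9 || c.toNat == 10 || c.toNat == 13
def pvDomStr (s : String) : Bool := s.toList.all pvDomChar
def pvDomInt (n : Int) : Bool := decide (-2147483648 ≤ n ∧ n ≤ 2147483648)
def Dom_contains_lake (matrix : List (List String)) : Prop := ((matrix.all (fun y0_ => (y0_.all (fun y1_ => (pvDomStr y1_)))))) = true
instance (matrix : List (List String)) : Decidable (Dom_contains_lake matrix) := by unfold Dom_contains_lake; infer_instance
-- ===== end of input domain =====

-- B replaces A's per-component DFS (with an is_lake flag) by one boundary-seeded flood fill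
-- followed by a plain scan of the interior for an unreached '0' (objective: simpler).

-- ===== PORT A =====
-- shared primitive: matrix[x][y] (every use in either program is guarded to be in range under Pre_)
def pvGet (m : List (List String)) (x y : Int) : String :=
  (PySem.List.pyGet? ((PySem.List.pyGet? m x).getD []) y).getD ""

def pvDirs : List (Int × Int) := [(-1, 0), (1, 0), (0, -1), (0, 1)]

def pvIsBoundary (rows cols : Int) (c : Int × Int) : Bool :=
  c.1 == 0 || c.2 == 0 || c.1 == rows - 1 || c.2 == cols - 1

-- body of the shared inner `for dx, dy in directions: …` neighbour loop
def pvPush (m : List (List String)) (rows cols : Int) (c : Int × Int)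
    (sv : List (Int × Int) × List (Int × Int)) (d : Int × Int) :
    List (Int × Int) × List (Int × Int) :=
  if 0 ≤ c.1 + d.1 ∧ c.1 + d.1 < rows ∧ 0 ≤ c.2 + d.2 ∧ c.2 + d.2 < cols ∧
      (c.1 + d.1, c.2 + d.2) ∉ sv.2 ∧ pvGet m (c.1 + d.1) (c.2 + d.2) = "0"
  then ((c.1 + d.1, c.2 + d.2) :: sv.1, (c.1 + d.1, c.2 + d.2) :: sv.2) else sv

def pvExpand (m : List (List String)) (rows cols : Int) (c : Int × Int)
    (sv : List (Int × Int) × List (Int × Int)) : List (Int × Int) × List (Int × Int) :=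
  pvDirs.foldl (pvPush m rows cols c) sv

-- A's `while stack:` inside dfs; head of the list is the top of Python's stack
def pvDfsLoop (m : List (List String)) (rows cols : Int) :
    Nat → List (Int × Int) → List (Int × Int) → Bool → Bool × List (Int × Int)
  | 0, _, vis, lake => (lake, vis)
  | _ + 1, [], vis, lake => (lake, vis)
  | f + 1, c :: rest, vis, lake =>
      let lake' := if pvIsBoundary rows cols c then false else lake
      let sv := pvExpand m rows cols c (rest, vis)
      pvDfsLoop m rows cols f sv.1 sv.2 lake'

-- index pairs of the nested `for i in range(1, rows-1): for j in range(1, cols-1)`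
def pvInterior (rows cols : Int) : List (Int × Int) :=
  (PySem.List.pyRange 1 (rows - 1) 1).flatMap (fun i =>
    (PySem.List.pyRange 1 (cols - 1) 1).map (fun j => (i, j)))

-- A's outer scan with the early `return True`
def pvScanA (m : List (List String)) (rows cols : Int) (fuel : Nat) :
    List (Int × Int) → List (Int × Int) → Bool
  | [], _ => false
  | c :: rest, vis =>
      if pvGet m c.1 c.2 = "0" ∧ c ∉ vis then
        let r := pvDfsLoop m rows cols fuel [c] (c :: vis) true
        if r.1 then true else pvScanA m rows cols fuel rest r.2
      else pvScanA m rows cols fuel rest vis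

def contains_lake (matrix : List (List String)) : Bool :=
  let rows : Int := matrix.length
  let cols : Int := (((PySem.List.pyGet? matrix 0).getD [])).length
  -- fuel bounds the number of while-iterations (each one consumes 1); 2·rows·cols + 1 always suffices
  pvScanA matrix rows cols (2 * (rows.toNat * cols.toNat) + 1) (pvInterior rows cols) []

-- ===== PORT B =====
-- index pairs of B's seeding double loop over the whole grid
def pvAllCells (rows cols : Int) : List (Int × Int) :=
  (PySem.List.pyRange 0 rows 1).flatMap (fun i =>
    (PySem.List.pyRange 0 cols 1).map (fun j => (i, j)))

-- B's seeding pass: every boundary '0' is marked visited as it is pushed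
def pvSeeds (m : List (List String)) (rows cols : Int) :
    List (Int × Int) → List (Int × Int) → List (Int × Int)
  | [], acc => acc
  | c :: rest, acc =>
      if pvIsBoundary rows cols c = true ∧ pvGet m c.1 c.2 = "0" ∧ c ∉ acc then
        pvSeeds m rows cols rest (c :: acc)
      else pvSeeds m rows cols rest acc

-- B's single `while stack:` flood loop
def pvFloodLoop (m : List (List String)) (rows cols : Int) :
    Nat → List (Int × Int) → List (Int × Int) → List (Int × Int)
  | 0, _, vis => vis
  | _ + 1, [], vis => vis
  | f + 1, c :: rest, vis =>
      let sv := pvExpand m rows cols c (rest, vis)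
      pvFloodLoop m rows cols f sv.1 sv.2

def contains_lake_alt (matrix : List (List String)) : Bool :=
  let rows : Int := matrix.length
  let cols : Int := (((PySem.List.pyGet? matrix 0).getD [])).length
  let seeds := pvSeeds matrix rows cols (pvAllCells rows cols) []
  let vis := pvFloodLoop matrix rows cols (2 * (rows.toNat * cols.toNat) + seeds.length) seeds seeds
  (pvInterior rows cols).any (fun c => decide (pvGet matrix c.1 c.2 = "0" ∧ c ∉ vis))

-- ===== PRECONDITION & SPEC =====
-- Pre_ excludes the empty matrix, on which A raises IndexError at matrix[0], and ragged
-- matrices with a row shorter than row 0, on which A raises IndexError or returns False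
-- depending only on which cells its scan happens to touch.
def Pre_contains_lake (matrix : List (List String)) : Prop :=
  matrix ≠ [] ∧ ∀ row ∈ matrix, (matrix.headD []).length ≤ row.length
instance (matrix : List (List String)) : Decidable (Pre_contains_lake matrix) := by
  unfold Pre_contains_lake; infer_instance

def pvWitness_contains_lake : List (List String) :=
  [["1", "1", "1"], ["1", "0", "1"], ["1", "1", "1"]]

def Spec_contains_lake (matrix : List (List String)) (out : Bool) : Prop := out = contains_lake_alt matrix
instance (matrix : List (List String)) (out : Bool) : Decidable (Spec_contains_lake matrix out) := by unfold Spec_contains_lake; infer_instance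

-- ===== CLAIM (what is proved, stated in full; the proofs are below) =====
def Claim_equal_contains_lake : Prop := ∀ (matrix : List (List String)), Dom_contains_lake matrix → Pre_contains_lake matrix → Spec_contains_lake matrix (contains_lake matrix)

-- ===== LEMMAS AND PROOFS =====

-- coordinates, adjacency and reachability through '0'-cells
def Inb (rows cols : Int) (c : Int × Int) : Prop :=
  0 ≤ c.1 ∧ c.1 < rows ∧ 0 ≤ c.2 ∧ c.2 < cols

def Nbr (c d : Int × Int) : Prop :=
  (d.1 = c.1 - 1 ∧ d.2 = c.2) ∨ (d.1 = c.1 + 1 ∧ d.2 = c.2) ∨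
  (d.1 = c.1 ∧ d.2 = c.2 - 1) ∨ (d.1 = c.1 ∧ d.2 = c.2 + 1)

def Step (m : List (List String)) (rows cols : Int) (c d : Int × Int) : Prop :=
  Nbr c d ∧ Inb rows cols d ∧ pvGet m d.1 d.2 = "0"

def Reach (m : List (List String)) (rows cols : Int) : Int × Int → Int × Int → Prop :=
  Relation.ReflTransGen (Step m rows cols)

def ZI (m : List (List String)) (rows cols : Int) (c : Int × Int) : Prop :=
  pvGet m c.1 c.2 = "0" ∧ Inb rows cols c

def Bdry (rows cols : Int) (c : Int × Int) : Prop :=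
  c.1 = 0 ∨ c.2 = 0 ∨ c.1 = rows - 1 ∨ c.2 = cols - 1

def LakeAt (m : List (List String)) (rows cols : Int) (c : Int × Int) : Prop :=
  ∀ d, Reach m rows cols c d → ¬ Bdry rows cols d

noncomputable def pvGrid (rows cols : Int) : Finset (Int × Int) :=
  Finset.Icc 0 (rows - 1) ×ˢ Finset.Icc 0 (cols - 1)

noncomputable def pvUnvis (rows cols : Int) (vis : List (Int × Int)) : Nat :=
  ((pvGrid rows cols).filter (fun c => c ∉ vis)).card

theorem nbr_symm {c d : Int × Int} (h : Nbr c d) : Nbr d c := by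
  unfold Nbr at *; omega

theorem isBoundary_iff (rows cols : Int) (c : Int × Int) :
    pvIsBoundary rows cols c = true ↔ Bdry rows cols c := by
  simp only [pvIsBoundary, Bool.or_eq_true, beq_iff_eq, Bdry]
  tauto

theorem dirs_nbr (c : Int × Int) : ∀ d ∈ pvDirs, Nbr c (c.1 + d.1, c.2 + d.2) := by
  intro d hd
  rcases show d = ((-1 : Int), (0 : Int)) ∨ d = (1, 0) ∨ d = (0, -1) ∨ d = (0, 1) by
      simpa [pvDirs] using hd with rfl | rfl | rfl | rfl <;>
    · unfold Nbr; simp; try omega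

theorem reach_props {m : List (List String)} {rows cols : Int} {c d : Int × Int}
    (hc : ZI m rows cols c) (h : Reach m rows cols c d) : ZI m rows cols d := by
  induction h with
  | refl => exact hc
  | tail _ hstep _ => exact ⟨hstep.2.2, hstep.2.1⟩

theorem reach_symm {m : List (List String)} {rows cols : Int} {c d : Int × Int}
    (hc : ZI m rows cols c) (h : Reach m rows cols c d) : Reach m rows cols d c := by
  induction h with
  | refl => exact Relation.ReflTransGen.refl
  | @tail b e hcb hstep ih =>
      have hb : ZI m rows cols b := reach_props hc hcb
      exact Relation.ReflTransGen.head ⟨nbr_symm hstep.1, hb.2, hb.1⟩ ih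

theorem closed_reach {m : List (List String)} {rows cols : Int} {V : List (Int × Int)}
    (hcl : ∀ x ∈ V, ∀ d, Step m rows cols x d → d ∈ V)
    {s c : Int × Int} (hs : s ∈ V) (h : Reach m rows cols s c) : c ∈ V := by
  induction h with
  | refl => exact hs
  | tail _ hstep ih => exact hcl _ ih _ hstep

theorem reach_avoid {m : List (List String)} {rows cols : Int} {vis : List (Int × Int)}
    (hcl : ∀ x ∈ vis, ∀ d, Step m rows cols x d → d ∈ vis)
    {c x : Int × Int} (hc : ZI m rows cols c) (hcv : c ∉ vis)
    (h : Reach m rows cols c x) : x ∉ vis := by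
  induction h with
  | refl => exact hcv
  | @tail b e hcb hstep ih =>
      intro he
      have hb : ZI m rows cols b := reach_props hc hcb
      exact ih (hcl e he b ⟨nbr_symm hstep.1, hb.2, hb.1⟩)

theorem step_mem_dirs {m : List (List String)} {rows cols : Int} {c x : Int × Int}
    (h : Step m rows cols c x) : ∃ d ∈ pvDirs, x = (c.1 + d.1, c.2 + d.2) := by
  obtain ⟨hn, -, -⟩ := h
  rcases x with ⟨x1, x2⟩
  unfold Nbr at hn
  rcases hn with ⟨h1, h2⟩ | ⟨h1, h2⟩ | ⟨h1, h2⟩ | ⟨h1, h2⟩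
  · exact ⟨(-1, 0), by simp [pvDirs], by simp at h1 h2 ⊢; omega⟩
  · exact ⟨(1, 0), by simp [pvDirs], by simp at h1 h2 ⊢; omega⟩
  · exact ⟨(0, -1), by simp [pvDirs], by simp at h1 h2 ⊢; omega⟩
  · exact ⟨(0, 1), by simp [pvDirs], by simp at h1 h2 ⊢; omega⟩

-- single-push facts
theorem push_mono (m : List (List String)) (rows cols : Int) (c : Int × Int)
    (sv : List (Int × Int) × List (Int × Int)) (d : Int × Int) :
    (∀ x ∈ sv.1, x ∈ (pvPush m rows cols c sv d).1) ∧
    (∀ x ∈ sv.2, x ∈ (pvPush m rows cols c sv d).2) := by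
  unfold pvPush
  split
  · exact ⟨fun x hx => List.mem_cons_of_mem _ hx, fun x hx => List.mem_cons_of_mem _ hx⟩
  · exact ⟨fun x hx => hx, fun x hx => hx⟩

theorem push_new (m : List (List String)) (rows cols : Int) (c : Int × Int)
    (sv : List (Int × Int) × List (Int × Int)) (d : Int × Int)
    (hnbr : Nbr c (c.1 + d.1, c.2 + d.2)) :
    (∀ x ∈ (pvPush m rows cols c sv d).1,
      x ∈ sv.1 ∨ (x ∈ (pvPush m rows cols c sv d).2 ∧ x ∉ sv.2 ∧ Step m rows cols c x)) ∧
    (∀ x ∈ (pvPush m rows cols c sv d).2,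
      x ∈ sv.2 ∨ (x ∈ (pvPush m rows cols c sv d).1 ∧ x ∉ sv.2 ∧ Step m rows cols c x)) := by
  unfold pvPush
  split
  case isTrue h =>
    obtain ⟨h1, h2, h3, h4, h5, h6⟩ := h
    have hstep : Step m rows cols c (c.1 + d.1, c.2 + d.2) := ⟨hnbr, ⟨h1, h2, h3, h4⟩, h6⟩
    constructor
    · intro x hx
      rcases List.mem_cons.1 hx with rfl | hx
      · exact Or.inr ⟨List.mem_cons_self, h5, hstep⟩
      · exact Or.inl hx
    · intro x hx
      rcases List.mem_cons.1 hx with rfl | hx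
      · exact Or.inr ⟨List.mem_cons_self, h5, hstep⟩
      · exact Or.inl hx
  case isFalse =>
    exact ⟨fun x hx => Or.inl hx, fun x hx => Or.inl hx⟩

theorem push_measure (m : List (List String)) (rows cols : Int) (c : Int × Int)
    (sv : List (Int × Int) × List (Int × Int)) (d : Int × Int) :
    2 * pvUnvis rows cols (pvPush m rows cols c sv d).2 + (pvPush m rows cols c sv d).1.length
      ≤ 2 * pvUnvis rows cols sv.2 + sv.1.length := by
  unfold pvPush
  split
  case isTrue h =>
    obtain ⟨h1, h2, h3, h4, h5, _⟩ := h
    have hlt : pvUnvis rows cols ((c.1 + d.1, c.2 + d.2) :: sv.2) < pvUnvis rows cols sv.2 := by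
      apply Finset.card_lt_card
      constructor
      · intro x hx
        simp only [Finset.mem_filter, List.mem_cons] at hx ⊢
        exact ⟨hx.1, fun hm => hx.2 (Or.inr hm)⟩
      · intro hsub
        have hmem : (c.1 + d.1, c.2 + d.2) ∈ (pvGrid rows cols).filter (fun x => x ∉ sv.2) := by
          simp only [Finset.mem_filter, pvGrid, Finset.mem_product, Finset.mem_Icc]
          exact ⟨⟨⟨h1, by omega⟩, ⟨h3, by omega⟩⟩, h5⟩
        have h := hsub hmem
        rw [Finset.mem_filter] at h
        exact h.2 List.mem_cons_self
    simp only [List.length_cons]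
    unfold pvUnvis at *
    omega
  case isFalse => exact le_refl _

-- facts about the direction fold (pvExpand over an arbitrary direction list)
theorem foldPush_mono (m : List (List String)) (rows cols : Int) (c : Int × Int)
    (l : List (Int × Int)) (sv : List (Int × Int) × List (Int × Int)) :
    (∀ x ∈ sv.1, x ∈ (l.foldl (pvPush m rows cols c) sv).1) ∧
    (∀ x ∈ sv.2, x ∈ (l.foldl (pvPush m rows cols c) sv).2) := by
  induction l generalizing sv with
  | nil => exact ⟨fun x hx => hx, fun x hx => hx⟩
  | cons d l ih =>
      refine ⟨fun x hx => ?_, fun x hx => ?_⟩ <;> simp only [List.foldl_cons]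
      · exact (ih _).1 x ((push_mono m rows cols c sv d).1 x hx)
      · exact (ih _).2 x ((push_mono m rows cols c sv d).2 x hx)

theorem foldPush_new (m : List (List String)) (rows cols : Int) (c : Int × Int)
    (l : List (Int × Int)) (sv : List (Int × Int) × List (Int × Int))
    (hl : ∀ d ∈ l, Nbr c (c.1 + d.1, c.2 + d.2)) :
    (∀ x ∈ (l.foldl (pvPush m rows cols c) sv).1,
      x ∈ sv.1 ∨ (x ∈ (l.foldl (pvPush m rows cols c) sv).2 ∧ x ∉ sv.2 ∧ Step m rows cols c x)) ∧
    (∀ x ∈ (l.foldl (pvPush m rows cols c) sv).2,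
      x ∈ sv.2 ∨ (x ∈ (l.foldl (pvPush m rows cols c) sv).1 ∧ x ∉ sv.2 ∧ Step m rows cols c x)) := by
  induction l generalizing sv with
  | nil => exact ⟨fun x hx => Or.inl hx, fun x hx => Or.inl hx⟩
  | cons d l ih =>
      simp only [List.foldl_cons]
      have hm := push_mono m rows cols c sv d
      have hn := push_new m rows cols c sv d (hl d List.mem_cons_self)
      have hfm := foldPush_mono m rows cols c l (pvPush m rows cols c sv d)
      have ih' := ih (fun e he => hl e (List.mem_cons_of_mem d he)) (sv := pvPush m rows cols c sv d)
      refine ⟨fun x hx => ?_, fun x hx => ?_⟩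
      · rcases ih'.1 x hx with h | ⟨hv, hnv, hs⟩
        · rcases hn.1 x h with h' | ⟨hv', hnv', hs'⟩
          · exact Or.inl h'
          · exact Or.inr ⟨hfm.2 x hv', hnv', hs'⟩
        · exact Or.inr ⟨hv, fun hx2 => hnv ((hm.2 x hx2)), hs⟩
      · rcases ih'.2 x hx with h | ⟨hv, hnv, hs⟩
        · rcases hn.2 x h with h' | ⟨hv', hnv', hs'⟩
          · exact Or.inl h'
          · exact Or.inr ⟨hfm.1 x hv', hnv', hs'⟩
        · exact Or.inr ⟨hv, fun hx2 => hnv ((hm.2 x hx2)), hs⟩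

theorem foldPush_measure (m : List (List String)) (rows cols : Int) (c : Int × Int)
    (l : List (Int × Int)) (sv : List (Int × Int) × List (Int × Int)) :
    2 * pvUnvis rows cols (l.foldl (pvPush m rows cols c) sv).2
        + (l.foldl (pvPush m rows cols c) sv).1.length
      ≤ 2 * pvUnvis rows cols sv.2 + sv.1.length := by
  induction l generalizing sv with
  | nil => exact le_refl _
  | cons d l ih =>
      simp only [List.foldl_cons]
      exact le_trans (ih _) (push_measure m rows cols c sv d)

theorem foldPush_closure (m : List (List String)) (rows cols : Int) (c : Int × Int)
    (l : List (Int × Int)) (sv : List (Int × Int) × List (Int × Int)) :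
    ∀ d ∈ l, Step m rows cols c (c.1 + d.1, c.2 + d.2) →
      (c.1 + d.1, c.2 + d.2) ∈ (l.foldl (pvPush m rows cols c) sv).2 := by
  induction l generalizing sv with
  | nil => simp
  | cons e l ih =>
      intro d hd hs
      simp only [List.foldl_cons]
      rcases List.mem_cons.1 hd with rfl | hd
      · apply (foldPush_mono m rows cols c l _).2
        unfold pvPush
        split
        case isTrue => exact List.mem_cons_self
        case isFalse h =>
          obtain ⟨-, ⟨i1, i2, i3, i4⟩, hz⟩ := hs
          by_contra hn
          exact h ⟨i1, i2, i3, i4, hn, hz⟩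
      · exact ih _ d hd hs

-- the same facts specialised to pvExpand (definitional repackaging)
theorem expand_mono (m : List (List String)) (rows cols : Int) (c : Int × Int)
    (rest vis : List (Int × Int)) :
    (∀ x ∈ rest, x ∈ (pvExpand m rows cols c (rest, vis)).1) ∧
    (∀ x ∈ vis, x ∈ (pvExpand m rows cols c (rest, vis)).2) :=
  foldPush_mono m rows cols c pvDirs (rest, vis)

theorem expand_new (m : List (List String)) (rows cols : Int) (c : Int × Int)
    (rest vis : List (Int × Int)) :
    (∀ x ∈ (pvExpand m rows cols c (rest, vis)).1,
      x ∈ rest ∨ (x ∈ (pvExpand m rows cols c (rest, vis)).2 ∧ x ∉ vis ∧ Step m rows cols c x)) ∧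
    (∀ x ∈ (pvExpand m rows cols c (rest, vis)).2,
      x ∈ vis ∨ (x ∈ (pvExpand m rows cols c (rest, vis)).1 ∧ x ∉ vis ∧ Step m rows cols c x)) :=
  foldPush_new m rows cols c pvDirs (rest, vis) (dirs_nbr c)

theorem expand_measure (m : List (List String)) (rows cols : Int) (c : Int × Int)
    (rest vis : List (Int × Int)) :
    2 * pvUnvis rows cols (pvExpand m rows cols c (rest, vis)).2
        + (pvExpand m rows cols c (rest, vis)).1.length
      ≤ 2 * pvUnvis rows cols vis + rest.length :=
  foldPush_measure m rows cols c pvDirs (rest, vis)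

theorem expand_closure (m : List (List String)) (rows cols : Int) (c : Int × Int)
    (rest vis : List (Int × Int)) :
    ∀ d, Step m rows cols c d → d ∈ (pvExpand m rows cols c (rest, vis)).2 := by
  intro d hs
  obtain ⟨dd, hdd, rfl⟩ := step_mem_dirs hs
  exact foldPush_closure m rows cols c pvDirs (rest, vis) dd hdd hs

-- the shared invariants are preserved by one expansion step
theorem expand_pres (m : List (List String)) (rows cols : Int) (c : Int × Int)
    (rest vis : List (Int × Int))
    (h1 : ∀ x ∈ c :: rest, x ∈ vis)
    (h3 : ∀ x ∈ vis, x ∉ c :: rest → ∀ d, Step m rows cols x d → d ∈ vis) :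
    (∀ x ∈ (pvExpand m rows cols c (rest, vis)).1, x ∈ (pvExpand m rows cols c (rest, vis)).2) ∧
    (∀ x ∈ (pvExpand m rows cols c (rest, vis)).2, x ∉ (pvExpand m rows cols c (rest, vis)).1 →
      ∀ d, Step m rows cols x d → d ∈ (pvExpand m rows cols c (rest, vis)).2) := by
  have hm := expand_mono m rows cols c rest vis
  have hnw := expand_new m rows cols c rest vis
  constructor
  · intro x hx
    rcases hnw.1 x hx with hx' | ⟨hv, -, -⟩
    · exact hm.2 x (h1 x (List.mem_cons_of_mem c hx'))
    · exact hv
  · intro x hx hxs d hsd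
    rcases hnw.2 x hx with hx' | ⟨hst, -, -⟩
    · by_cases hxc : x = c
      · subst hxc
        exact expand_closure m rows cols x rest vis d hsd
      · have hxr : x ∉ rest := fun hr => hxs (hm.1 x hr)
        have hxcr : x ∉ c :: rest := by simp [hxc, hxr]
        exact hm.2 _ (h3 x hx' hxcr d hsd)
    · exact absurd hst hxs

-- the flood loop computes exactly `visited ∪ (cells reachable from the stack through '0's)`
theorem flood_spec (m : List (List String)) (rows cols : Int) :
    ∀ (fuel : Nat) (stack vis : List (Int × Int)),
    (∀ x ∈ stack, x ∈ vis) →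
    (∀ x ∈ vis, x ∉ stack → ∀ d, Step m rows cols x d → d ∈ vis) →
    2 * pvUnvis rows cols vis + stack.length ≤ fuel →
    (∀ x ∈ vis, x ∈ pvFloodLoop m rows cols fuel stack vis) ∧
    (∀ x ∈ pvFloodLoop m rows cols fuel stack vis,
      x ∈ vis ∨ ∃ s ∈ stack, Reach m rows cols s x) ∧
    (∀ x ∈ pvFloodLoop m rows cols fuel stack vis, ∀ d, Step m rows cols x d →
      d ∈ pvFloodLoop m rows cols fuel stack vis) := by
  intro fuel
  induction fuel with
  | zero =>
      intro stack vis h1 h3 hf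
      have hs : stack = [] := by
        cases stack with
        | nil => rfl
        | cons a l => simp only [List.length_cons] at hf; omega
      subst hs
      exact ⟨fun x hx => hx, fun x hx => Or.inl hx,
        fun x hx d hsd => h3 x hx (by simp) d hsd⟩
  | succ f ih =>
      intro stack vis h1 h3 hf
      cases stack with
      | nil =>
          exact ⟨fun x hx => hx, fun x hx => Or.inl hx,
            fun x hx d hsd => h3 x hx (by simp) d hsd⟩
      | cons c rest =>
          have hm := expand_mono m rows cols c rest vis
          have hnw := expand_new m rows cols c rest vis
          have hpres := expand_pres m rows cols c rest vis h1 h3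
          have hf' : 2 * pvUnvis rows cols (pvExpand m rows cols c (rest, vis)).2
              + (pvExpand m rows cols c (rest, vis)).1.length ≤ f := by
            have hms := expand_measure m rows cols c rest vis
            simp only [List.length_cons] at hf
            omega
          obtain ⟨ihA, ihB, ihC⟩ := ih (pvExpand m rows cols c (rest, vis)).1
            (pvExpand m rows cols c (rest, vis)).2 hpres.1 hpres.2 hf'
          have hrun : pvFloodLoop m rows cols (f + 1) (c :: rest) vis
              = pvFloodLoop m rows cols f (pvExpand m rows cols c (rest, vis)).1
                  (pvExpand m rows cols c (rest, vis)).2 := rfl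
          rw [hrun]
          refine ⟨fun x hx => ihA x (hm.2 x hx), fun x hx => ?_, ihC⟩
          rcases ihB x hx with hx' | ⟨s, hs, hr⟩
          · rcases hnw.2 x hx' with h | ⟨-, -, hstep⟩
            · exact Or.inl h
            · exact Or.inr ⟨c, List.mem_cons_self, Relation.ReflTransGen.single hstep⟩
          · rcases hnw.1 s hs with h | ⟨-, -, hstep⟩
            · exact Or.inr ⟨s, List.mem_cons_of_mem c h, hr⟩
            · exact Or.inr ⟨c, List.mem_cons_self, Relation.ReflTransGen.head hstep hr⟩

-- A's dfs loop visits the same cells as the plain flood loop …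
theorem dfs_snd (m : List (List String)) (rows cols : Int) :
    ∀ (fuel : Nat) (stack vis : List (Int × Int)) (b : Bool),
      (pvDfsLoop m rows cols fuel stack vis b).2 = pvFloodLoop m rows cols fuel stack vis := by
  intro fuel
  induction fuel with
  | zero => intro stack vis b; rfl
  | succ f ih =>
      intro stack vis b
      cases stack with
      | nil => rfl
      | cons c rest => exact ih _ _ _

-- … and its is_lake flag records exactly `no popped cell was on the boundary`
theorem dfs_fst (m : List (List String)) (rows cols : Int) :
    ∀ (fuel : Nat) (stack vis : List (Int × Int)) (b : Bool),
    (∀ x ∈ stack, x ∈ vis) →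
    (∀ x ∈ vis, x ∉ stack → ∀ d, Step m rows cols x d → d ∈ vis) →
    2 * pvUnvis rows cols vis + stack.length ≤ fuel →
    ((pvDfsLoop m rows cols fuel stack vis b).1 = true ↔
      (b = true ∧ ∀ x, (x ∈ stack ∨ (x ∈ pvFloodLoop m rows cols fuel stack vis ∧ x ∉ vis)) →
        ¬ Bdry rows cols x)) := by
  intro fuel
  induction fuel with
  | zero =>
      intro stack vis b h1 h3 hf
      have hs : stack = [] := by
        cases stack with
        | nil => rfl
        | cons a l => simp only [List.length_cons] at hf; omega
      subst hs
      constructor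
      · intro hb
        exact ⟨hb, fun x hx => by
          rcases hx with hx | ⟨hx, hnx⟩
          · simp at hx
          · exact absurd hx hnx⟩
      · exact fun h => h.1
  | succ f ih =>
      intro stack vis b h1 h3 hf
      cases stack with
      | nil =>
          constructor
          · intro hb
            exact ⟨hb, fun x hx => by
              rcases hx with hx | ⟨hx, hnx⟩
              · simp at hx
              · exact absurd hx hnx⟩
          · exact fun h => h.1
      | cons c rest =>
          have hm := expand_mono m rows cols c rest vis
          have hnw := expand_new m rows cols c rest vis
          have hpres := expand_pres m rows cols c rest vis h1 h3
          have hf' : 2 * pvUnvis rows cols (pvExpand m rows cols c (rest, vis)).2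
              + (pvExpand m rows cols c (rest, vis)).1.length ≤ f := by
            have hms := expand_measure m rows cols c rest vis
            simp only [List.length_cons] at hf
            omega
          have hVsub : ∀ x ∈ (pvExpand m rows cols c (rest, vis)).2,
              x ∈ pvFloodLoop m rows cols f (pvExpand m rows cols c (rest, vis)).1
                (pvExpand m rows cols c (rest, vis)).2 :=
            (flood_spec m rows cols f _ _ hpres.1 hpres.2 hf').1
          have hrunF : pvFloodLoop m rows cols (f + 1) (c :: rest) vis
              = pvFloodLoop m rows cols f (pvExpand m rows cols c (rest, vis)).1
                  (pvExpand m rows cols c (rest, vis)).2 := rfl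
          have hrunD : pvDfsLoop m rows cols (f + 1) (c :: rest) vis b
              = pvDfsLoop m rows cols f (pvExpand m rows cols c (rest, vis)).1
                  (pvExpand m rows cols c (rest, vis)).2
                  (if pvIsBoundary rows cols c then false else b) := rfl
          rw [hrunD, hrunF]
          have key : ∀ x, (x ∈ (c :: rest) ∨
              (x ∈ pvFloodLoop m rows cols f (pvExpand m rows cols c (rest, vis)).1
                (pvExpand m rows cols c (rest, vis)).2 ∧ x ∉ vis)) ↔
              (x = c ∨ x ∈ (pvExpand m rows cols c (rest, vis)).1 ∨
               (x ∈ pvFloodLoop m rows cols f (pvExpand m rows cols c (rest, vis)).1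
                 (pvExpand m rows cols c (rest, vis)).2 ∧
                x ∉ (pvExpand m rows cols c (rest, vis)).2)) := by
            intro x
            constructor
            · rintro (hx | ⟨hxV, hxv⟩)
              · rcases List.mem_cons.1 hx with rfl | hx
                · exact Or.inl rfl
                · exact Or.inr (Or.inl (hm.1 x hx))
              · by_cases hx2 : x ∈ (pvExpand m rows cols c (rest, vis)).2
                · rcases hnw.2 x hx2 with h | ⟨hst, -, -⟩
                  · exact absurd h hxv
                  · exact Or.inr (Or.inl hst)
                · exact Or.inr (Or.inr ⟨hxV, hx2⟩)
            · rintro (rfl | hx | ⟨hxV, hx2⟩)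
              · exact Or.inl List.mem_cons_self
              · rcases hnw.1 x hx with h | ⟨hv2, hnv, -⟩
                · exact Or.inl (List.mem_cons_of_mem c h)
                · exact Or.inr ⟨hVsub x hv2, hnv⟩
              · exact Or.inr ⟨hxV, fun hv => hx2 (hm.2 x hv)⟩
          rw [ih (pvExpand m rows cols c (rest, vis)).1
            (pvExpand m rows cols c (rest, vis)).2 _ hpres.1 hpres.2 hf']
          constructor
          · rintro ⟨hlake, hall⟩
            have hnb : pvIsBoundary rows cols c = false := by
              by_contra hh
              simp only [Bool.not_eq_false] at hh
              rw [hh] at hlake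
              simp at hlake
            rw [hnb] at hlake
            simp only [Bool.false_eq_true, if_false] at hlake
            refine ⟨hlake, fun x hx => ?_⟩
            rcases (key x).1 hx with rfl | hx'
            · rw [← isBoundary_iff]
              simp [hnb]
            · exact hall x hx'
          · rintro ⟨hb, hall⟩
            have hnbdry : ¬ Bdry rows cols c := hall c (Or.inl List.mem_cons_self)
            have hnb : pvIsBoundary rows cols c = false := by
              by_contra hh
              simp only [Bool.not_eq_false] at hh
              exact hnbdry ((isBoundary_iff rows cols c).1 hh)
            refine ⟨by rw [hnb]; simpa using hb, fun x hx => ?_⟩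
            apply hall
            exact (key x).2 (Or.inr hx)

-- membership descriptions of the two index lists
theorem pvInterior_mem (rows cols : Int) (c : Int × Int) :
    c ∈ pvInterior rows cols ↔ 1 ≤ c.1 ∧ c.1 < rows - 1 ∧ 1 ≤ c.2 ∧ c.2 < cols - 1 := by
  rcases c with ⟨a, b⟩
  simp only [pvInterior, List.mem_flatMap, List.mem_map, PySem.List.mem_pyRange_one,
    Prod.mk.injEq]
  constructor
  · rintro ⟨i, hi, j, hj, rfl, rfl⟩
    exact ⟨hi.1, hi.2, hj.1, hj.2⟩
  · rintro ⟨h1, h2, h3, h4⟩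
    exact ⟨a, ⟨h1, h2⟩, b, ⟨h3, h4⟩, rfl, rfl⟩

theorem pvAllCells_mem (rows cols : Int) (c : Int × Int) :
    c ∈ pvAllCells rows cols ↔ Inb rows cols c := by
  rcases c with ⟨a, b⟩
  simp only [pvAllCells, List.mem_flatMap, List.mem_map, PySem.List.mem_pyRange_one,
    Prod.mk.injEq, Inb]
  constructor
  · rintro ⟨i, hi, j, hj, rfl, rfl⟩
    exact ⟨hi.1, hi.2, hj.1, hj.2⟩
  · rintro ⟨h1, h2, h3, h4⟩
    exact ⟨a, ⟨h1, h2⟩, b, ⟨h3, h4⟩, rfl, rfl⟩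

theorem seeds_mem (m : List (List String)) (rows cols : Int) :
    ∀ (l acc : List (Int × Int)) (x : Int × Int),
      x ∈ pvSeeds m rows cols l acc ↔
        x ∈ acc ∨ (x ∈ l ∧ Bdry rows cols x ∧ pvGet m x.1 x.2 = "0") := by
  intro l
  induction l with
  | nil =>
      intro acc x
      rw [show pvSeeds m rows cols [] acc = acc from rfl]
      simp
  | cons c rest ih =>
      intro acc x
      show x ∈ (if pvIsBoundary rows cols c = true ∧ pvGet m c.1 c.2 = "0" ∧ c ∉ acc then
          pvSeeds m rows cols rest (c :: acc) else pvSeeds m rows cols rest acc) ↔ _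
      by_cases hc : pvIsBoundary rows cols c = true ∧ pvGet m c.1 c.2 = "0" ∧ c ∉ acc
      · rw [if_pos hc, ih]
        obtain ⟨hb, hz, hna⟩ := hc
        constructor
        · rintro (hx | ⟨hx, hbd, hz'⟩)
          · rcases List.mem_cons.1 hx with rfl | hx
            · exact Or.inr ⟨List.mem_cons_self, (isBoundary_iff rows cols x).1 hb, hz⟩
            · exact Or.inl hx
          · exact Or.inr ⟨List.mem_cons_of_mem c hx, hbd, hz'⟩
        · rintro (hx | ⟨hx, hbd, hz'⟩)
          · exact Or.inl (List.mem_cons_of_mem c hx)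
          · rcases List.mem_cons.1 hx with rfl | hx
            · exact Or.inl List.mem_cons_self
            · exact Or.inr ⟨hx, hbd, hz'⟩
      · rw [if_neg hc, ih]
        constructor
        · rintro (hx | ⟨hx, hbd, hz'⟩)
          · exact Or.inl hx
          · exact Or.inr ⟨List.mem_cons_of_mem c hx, hbd, hz'⟩
        · rintro (hx | ⟨hx, hbd, hz'⟩)
          · exact Or.inl hx
          · rcases List.mem_cons.1 hx with rfl | hx
            · by_cases hca : x ∈ acc
              · exact Or.inl hca
              · exact absurd ⟨(isBoundary_iff rows cols x).2 hbd, hz', hca⟩ hc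
            · exact Or.inr ⟨hx, hbd, hz'⟩

theorem unvis_le (rows cols : Int) (vis : List (Int × Int)) :
    pvUnvis rows cols vis ≤ rows.toNat * cols.toNat := by
  have h1 := Finset.card_filter_le (pvGrid rows cols) (fun c => c ∉ vis)
  have h2 : (pvGrid rows cols).card = rows.toNat * cols.toNat := by
    rw [pvGrid, Finset.card_product, Int.card_Icc, Int.card_Icc]
    norm_num
  unfold pvUnvis
  omega

-- A's outer scan returns true iff some interior '0'-cell heads an enclosed component
theorem scanA_iff (m : List (List String)) (rows cols : Int) :
    ∀ (cells vis : List (Int × Int)),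
    (∀ c ∈ cells, 1 ≤ c.1 ∧ c.1 < rows - 1 ∧ 1 ≤ c.2 ∧ c.2 < cols - 1) →
    (∀ x ∈ vis, ZI m rows cols x) →
    (∀ x ∈ vis, ∀ d, Step m rows cols x d → d ∈ vis) →
    (∀ x ∈ vis, ∃ d, Reach m rows cols x d ∧ Bdry rows cols d) →
    (pvScanA m rows cols (2 * (rows.toNat * cols.toNat) + 1) cells vis = true ↔
      ∃ c ∈ cells, pvGet m c.1 c.2 = "0" ∧ LakeAt m rows cols c) := by
  intro cells
  induction cells with
  | nil =>
      intro vis _ _ _ _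
      rw [show pvScanA m rows cols (2 * (rows.toNat * cols.toNat) + 1) [] vis = false from rfl]
      simp
  | cons c rest ih =>
      intro vis hcells hvZI hvCl hvBd
      have hcint := hcells c List.mem_cons_self
      have hrest : ∀ x ∈ rest, 1 ≤ x.1 ∧ x.1 < rows - 1 ∧ 1 ≤ x.2 ∧ x.2 < cols - 1 :=
        fun x hx => hcells x (List.mem_cons_of_mem c hx)
      by_cases hc : pvGet m c.1 c.2 = "0" ∧ c ∉ vis
      · obtain ⟨hzero, hcv⟩ := hc
        have hZIc : ZI m rows cols c := ⟨hzero, by unfold Inb; omega⟩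
        -- flood facts for the dfs started at c
        have h1c : ∀ x ∈ [c], x ∈ c :: vis := by simp
        have h3c : ∀ x ∈ c :: vis, x ∉ [c] → ∀ d, Step m rows cols x d → d ∈ c :: vis := by
          intro x hx hxn d hsd
          rcases List.mem_cons.1 hx with rfl | hx
          · exact absurd List.mem_cons_self hxn
          · exact List.mem_cons_of_mem c (hvCl x hx d hsd)
        have hfc : 2 * pvUnvis rows cols (c :: vis) + ([c] : List (Int × Int)).length
            ≤ 2 * (rows.toNat * cols.toNat) + 1 := by
          have := unvis_le rows cols (c :: vis)
          simp only [List.length_cons, List.length_nil]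
          omega
        obtain ⟨fA, fB, fC⟩ := flood_spec m rows cols (2 * (rows.toNat * cols.toNat) + 1)
          [c] (c :: vis) h1c h3c hfc
        set V := pvFloodLoop m rows cols (2 * (rows.toNat * cols.toNat) + 1) [c] (c :: vis)
          with hVdef
        have hVmem : ∀ x, x ∈ V ↔ (Reach m rows cols c x ∨ x ∈ vis) := by
          intro x
          constructor
          · intro hx
            rcases fB x hx with hx' | ⟨s, hs, hr⟩
            · rcases List.mem_cons.1 hx' with rfl | hx''
              · exact Or.inl Relation.ReflTransGen.refl
              · exact Or.inr hx''
            · rcases List.mem_cons.1 (h1c s hs) with rfl | hs'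
              · exact Or.inl hr
              · rcases (show s = c by simpa using hs) with rfl
                exact Or.inl hr
          · rintro (hr | hx)
            · exact closed_reach fC (fA c List.mem_cons_self) hr
            · exact fA x (List.mem_cons_of_mem c hx)
        have hdisj : ∀ x, Reach m rows cols c x → x ∉ vis :=
          fun x hr => reach_avoid hvCl hZIc hcv hr
        have hlake_iff : (pvDfsLoop m rows cols (2 * (rows.toNat * cols.toNat) + 1)
            [c] (c :: vis) true).1 = true ↔ LakeAt m rows cols c := by
          rw [dfs_fst m rows cols _ [c] (c :: vis) true h1c h3c hfc]
          constructor
          · rintro ⟨-, hall⟩ d hr hbd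
            by_cases hdc : d = c
            · subst hdc
              exact hall d (Or.inl List.mem_cons_self) hbd
            · refine hall d (Or.inr ⟨(hVmem d).2 (Or.inl hr), ?_⟩) hbd
              simp only [List.mem_cons, not_or]
              exact ⟨hdc, hdisj d hr⟩
          · intro hlk
            refine ⟨rfl, fun x hx hbd => ?_⟩
            rcases hx with hx | ⟨hxV, hxnv⟩
            · rcases (show x = c by simpa using hx) with rfl
              exact hlk x Relation.ReflTransGen.refl hbd
            · rcases (hVmem x).1 hxV with hr | hxv
              · exact hlk x hr hbd
              · exact hxnv (List.mem_cons_of_mem c hxv)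
        have hrun : pvScanA m rows cols (2 * (rows.toNat * cols.toNat) + 1) (c :: rest) vis
            = (if (pvDfsLoop m rows cols (2 * (rows.toNat * cols.toNat) + 1)
                  [c] (c :: vis) true).1 then true
               else pvScanA m rows cols (2 * (rows.toNat * cols.toNat) + 1) rest
                  (pvDfsLoop m rows cols (2 * (rows.toNat * cols.toNat) + 1)
                    [c] (c :: vis) true).2) := by
          show (if pvGet m c.1 c.2 = "0" ∧ c ∉ vis then _ else _) = _
          rw [if_pos ⟨hzero, hcv⟩]
        rw [hrun]
        by_cases hdfs : (pvDfsLoop m rows cols (2 * (rows.toNat * cols.toNat) + 1)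
            [c] (c :: vis) true).1 = true
        · rw [hdfs, if_pos rfl]
          simp only [true_iff]
          exact ⟨c, List.mem_cons_self, hzero, hlake_iff.1 hdfs⟩
        · have hdfs' : (pvDfsLoop m rows cols (2 * (rows.toNat * cols.toNat) + 1)
              [c] (c :: vis) true).1 = false := by
            simpa using hdfs
          rw [hdfs', if_neg (by simp)]
          have hnlk : ¬ LakeAt m rows cols c := fun h => hdfs (hlake_iff.2 h)
          obtain ⟨d0, hr0, hb0⟩ : ∃ d0, Reach m rows cols c d0 ∧ Bdry rows cols d0 := by
            by_contra hcon
            apply hnlk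
            intro d hr hbd
            exact hcon ⟨d, hr, hbd⟩
          have hsnd : (pvDfsLoop m rows cols (2 * (rows.toNat * cols.toNat) + 1)
              [c] (c :: vis) true).2 = V := dfs_snd m rows cols _ _ _ _
          rw [hsnd]
          have hVZI : ∀ x ∈ V, ZI m rows cols x := by
            intro x hx
            rcases (hVmem x).1 hx with hr | hxv
            · exact reach_props hZIc hr
            · exact hvZI x hxv
          have hVBd : ∀ x ∈ V, ∃ d, Reach m rows cols x d ∧ Bdry rows cols d := by
            intro x hx
            rcases (hVmem x).1 hx with hr | hxv
            · exact ⟨d0, Relation.ReflTransGen.trans (reach_symm hZIc hr) hr0, hb0⟩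
            · exact hvBd x hxv
          rw [ih V hrest hVZI fC hVBd]
          constructor
          · rintro ⟨x, hx, hp⟩
            exact ⟨x, List.mem_cons_of_mem c hx, hp⟩
          · rintro ⟨x, hx, hz, hp⟩
            rcases List.mem_cons.1 hx with rfl | hx
            · exact absurd hp hnlk
            · exact ⟨x, hx, hz, hp⟩
      · have hrun : pvScanA m rows cols (2 * (rows.toNat * cols.toNat) + 1) (c :: rest) vis
            = pvScanA m rows cols (2 * (rows.toNat * cols.toNat) + 1) rest vis := by
          show (if pvGet m c.1 c.2 = "0" ∧ c ∉ vis then _ else _) = _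
          rw [if_neg hc]
        rw [hrun, ih vis hrest hvZI hvCl hvBd]
        constructor
        · rintro ⟨x, hx, hp⟩
          exact ⟨x, List.mem_cons_of_mem c hx, hp⟩
        · rintro ⟨x, hx, hz, hp⟩
          rcases List.mem_cons.1 hx with rfl | hx
          · -- c is '0' but already visited: its component touches the boundary
            have hcv : x ∈ vis := by
              by_contra hnv
              exact hc ⟨hz, hnv⟩
            obtain ⟨d, hr, hb⟩ := hvBd x hcv
            exact absurd hb (hp d hr)
          · exact ⟨x, hx, hz, hp⟩

theorem bool_eq_of_iff {a b : Bool} (h : (a = true) ↔ (b = true)) : a = b := by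
  cases a <;> cases b <;> simp_all

-- ===== VERDICT (by name: the statement is the Claim_ definition above) =====
theorem ports_agree (m : List (List String)) (rows cols : Int) :
    pvScanA m rows cols (2 * (rows.toNat * cols.toNat) + 1) (pvInterior rows cols) []
      = (pvInterior rows cols).any (fun c => decide (pvGet m c.1 c.2 = "0" ∧
          c ∉ pvFloodLoop m rows cols
                (2 * (rows.toNat * cols.toNat)
                  + (pvSeeds m rows cols (pvAllCells rows cols) []).length)
                (pvSeeds m rows cols (pvAllCells rows cols) [])
                (pvSeeds m rows cols (pvAllCells rows cols) []))) := by
  apply bool_eq_of_iff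
  set seeds := pvSeeds m rows cols (pvAllCells rows cols) [] with hseeds
  set Vb := pvFloodLoop m rows cols (2 * (rows.toNat * cols.toNat) + seeds.length)
    seeds seeds with hVbdef
  have hseed_mem : ∀ x, x ∈ seeds ↔
      Inb rows cols x ∧ Bdry rows cols x ∧ pvGet m x.1 x.2 = "0" := by
    intro x
    rw [hseeds, seeds_mem]
    simp only [List.not_mem_nil, false_or, pvAllCells_mem]
  have h1s : ∀ x ∈ seeds, x ∈ seeds := fun x hx => hx
  have h3s : ∀ x ∈ seeds, x ∉ seeds → ∀ d, Step m rows cols x d → d ∈ seeds :=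
    fun x hx hnx => absurd hx hnx
  have hfs : 2 * pvUnvis rows cols seeds + seeds.length
      ≤ 2 * (rows.toNat * cols.toNat) + seeds.length := by
    have := unvis_le rows cols seeds
    omega
  obtain ⟨gA, gB, gC⟩ := flood_spec m rows cols
    (2 * (rows.toNat * cols.toNat) + seeds.length) seeds seeds h1s h3s hfs
  rw [← hVbdef] at gA gB gC
  have hVb_mem : ∀ x, x ∈ Vb ↔
      ∃ s, (Bdry rows cols s ∧ ZI m rows cols s) ∧ Reach m rows cols s x := by
    intro x
    constructor
    · intro hx
      rcases gB x hx with hx' | ⟨s, hs, hr⟩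
      · obtain ⟨hi, hb, hz⟩ := (hseed_mem x).1 hx'
        exact ⟨x, ⟨hb, hz, hi⟩, Relation.ReflTransGen.refl⟩
      · obtain ⟨hi, hb, hz⟩ := (hseed_mem s).1 hs
        exact ⟨s, ⟨hb, hz, hi⟩, hr⟩
    · rintro ⟨s, ⟨hb, hz, hi⟩, hr⟩
      exact closed_reach gC (gA s ((hseed_mem s).2 ⟨hi, hb, hz⟩)) hr
  -- per-cell equivalence on the interior
  have hcell : ∀ c ∈ pvInterior rows cols, pvGet m c.1 c.2 = "0" →
      (LakeAt m rows cols c ↔ c ∉ Vb) := by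
    intro c hcmem hz
    obtain ⟨hi1, hi2, hi3, hi4⟩ := (pvInterior_mem rows cols c).1 hcmem
    have hZIc : ZI m rows cols c := ⟨hz, by unfold Inb; omega⟩
    constructor
    · intro hlk hcVb
      obtain ⟨s, ⟨hbs, hzs⟩, hr⟩ := (hVb_mem c).1 hcVb
      exact hlk s (reach_symm hzs hr) hbs
    · intro hnc d hr hbd
      have hZId : ZI m rows cols d := reach_props hZIc hr
      exact hnc ((hVb_mem c).2 ⟨d, ⟨hbd, hZId⟩, reach_symm hZIc hr⟩)
  -- assemble both sides
  have hA : pvScanA m rows cols (2 * (rows.toNat * cols.toNat) + 1)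
      (pvInterior rows cols) [] = true ↔
      ∃ c ∈ pvInterior rows cols, pvGet m c.1 c.2 = "0" ∧ LakeAt m rows cols c := by
    apply scanA_iff
    · intro c hc
      exact (pvInterior_mem rows cols c).1 hc
    · intro x hx; simp at hx
    · intro x hx; simp at hx
    · intro x hx; simp at hx
  have hB : ((pvInterior rows cols).any
      (fun c => decide (pvGet m c.1 c.2 = "0" ∧ c ∉ Vb))) = true ↔
      ∃ c ∈ pvInterior rows cols, pvGet m c.1 c.2 = "0" ∧ c ∉ Vb := by
    rw [List.any_eq_true]
    constructor
    · rintro ⟨c, hc, hp⟩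
      exact ⟨c, hc, of_decide_eq_true hp⟩
    · rintro ⟨c, hc, hp⟩
      exact ⟨c, hc, decide_eq_true hp⟩
  rw [hA, hB]
  constructor
  · rintro ⟨c, hc, hz, hp⟩
    exact ⟨c, hc, hz, (hcell c hc hz).1 hp⟩
  · rintro ⟨c, hc, hz, hp⟩
    exact ⟨c, hc, hz, (hcell c hc hz).2 hp⟩

theorem contains_lake_spec : Claim_equal_contains_lake := by
  intro matrix _ _
  -- the two total ports in fact agree on every input (for arbitrary rows/cols parameters);
  -- Pre_ is needed only for faithfulness to the Python originals
  exact ports_agree matrix (matrix.length : Int)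
    ((((PySem.List.pyGet? matrix 0).getD [])).length : Int)
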